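-- pv_equiv track=rewrite | github.com/Ranjithkumar3005/python_programs | interview_qs/cognisent/extract_bread_colour.py | find_bread_colors
-- ===== SOURCE A (Python) =====
-- def find_bread_colors(input_str: str) -> str:
--     breads = []
--     n = len(input_str)
--     is_bread = [False] * n
--
--     for i in range(n):
--         if not is_bread[i]:
--             bread = input_str[i]
--             for j in range(i + 1, n):
--                 if input_str[j] == bread:
--                     # Mark all positions from i to j as bread
--                     for k in range(i, j + 1):
--                         is_bread[k] = True
--                     breads.append(bread)
--                     break
--
--     return ''.join(breads)
-- ===== SOURCE B (Python) =====
-- def find_bread_colors(input_str: str) -> str: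
--     n = len(input_str)
--     # next-same-char index per position, built right-to-left with a dict
--     last = {}
--     nxt = []
--     for i in range(n - 1, -1, -1):
--         c = input_str[i]
--         nxt.append(last.get(c))
--         last[c] = i
--     nxt.reverse()
--     out = []
--     i = 0
--     while i < n:
--         j = nxt[i]
--         if j is None:
--             i += 1
--         else:
--             out.append(input_str[i])
--             i = j + 1
--     return ''.join(out)
-- ===== Notes on version B (the rewrite author's own statement) =====
-- stated objective: alternative
-- what changed: Replaces the quadratic-worst-case rescan (inner forward scan for the next equal char plus a marking pass per hit) by a precomputed next-same-char index table built right-to-left with a dict, then a single jumping left-to-right pass; no is_bread array at all.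
import Mathlib
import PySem

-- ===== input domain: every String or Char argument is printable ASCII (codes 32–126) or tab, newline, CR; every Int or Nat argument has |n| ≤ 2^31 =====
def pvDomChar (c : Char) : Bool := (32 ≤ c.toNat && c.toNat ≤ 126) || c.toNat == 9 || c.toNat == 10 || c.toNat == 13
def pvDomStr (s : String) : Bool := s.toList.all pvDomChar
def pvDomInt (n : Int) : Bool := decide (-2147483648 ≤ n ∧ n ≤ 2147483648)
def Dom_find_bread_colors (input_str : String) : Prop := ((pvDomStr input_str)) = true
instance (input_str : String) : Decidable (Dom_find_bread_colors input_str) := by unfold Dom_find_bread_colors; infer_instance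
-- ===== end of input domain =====

-- B replaces A's rescan-and-mark by a precomputed next-same-char table (dict, one
-- right-to-left pass) and a single jumping left-to-right pass; objective: alternative algorithm.

-- ===== PORT A =====

-- inner `for j in range(i+1, n): if input_str[j] == bread: … break` — first matching index
def innerScan (cs : List Char) (bread : Char) (j n : Nat) : Option Nat :=
  if _h : j < n then
    if cs.getD j ' ' == bread then some j else innerScan cs bread (j + 1) n
  else none
termination_by n - j

def find_bread_colors (input_str : String) : String :=
  let cs := input_str.toList
  let n := cs.length
  let res := (List.range n).foldl
    (fun (st : List Char × List Bool) i =>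
      if !(st.2.getD i false) then
        let bread := cs.getD i ' '
        match innerScan cs bread (i + 1) n with
        | some j =>
          -- for k in range(i, j+1): is_bread[k] = True
          let ib' := (List.range' i (j + 1 - i)).foldl (fun l k => l.set k true) st.2
          (st.1 ++ [bread], ib')
        | none => st
      else st)
    ([], List.replicate n false)
  String.mk res.1

-- ===== PORT B =====

-- while i < n: j = nxt[i]; skip or emit-and-jump (fuel bounds the loop; i strictly grows)
def altWalk (cs : List Char) (nxt : List (Option Nat)) : Nat → Nat → List Char → List Char
  | 0, _, out => out
  | fuel + 1, i, out =>
    if i < cs.length then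
      match nxt.getD i none with
      | none => altWalk cs nxt fuel (i + 1) out
      | some j => altWalk cs nxt fuel (j + 1) (out ++ [cs.getD i ' '])
    else out

def find_bread_colors_alt (input_str : String) : String :=
  let cs := input_str.toList
  let n := cs.length
  -- for i in range(n-1, -1, -1): nxt.append(last.get(c)); last[c] = i  — then reverse
  let built := (List.range n).reverse.foldl
    (fun (st : PySem.Dict Char Nat × List (Option Nat)) i =>
      let c := cs.getD i ' '
      (st.1.insert c i, st.2 ++ [st.1.get? c]))
    (PySem.Dict.empty, [])
  let nxt := built.2.reverse
  String.mk (altWalk cs nxt (n + 1) 0 [])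

-- ===== PRECONDITION & SPEC =====
def Spec_find_bread_colors (input_str : String) (out : String) : Prop := out = find_bread_colors_alt input_str
instance (input_str : String) (out : String) : Decidable (Spec_find_bread_colors input_str out) := by unfold Spec_find_bread_colors; infer_instance

-- ===== CLAIM (what is proved, stated in full; the proofs are below) =====
def Claim_equal_find_bread_colors : Prop := ∀ (input_str : String), Dom_find_bread_colors input_str → Spec_find_bread_colors input_str (find_bread_colors input_str)

-- ===== LEMMAS AND PROOFS =====

theorem innerScan_bounds (cs : List Char) (bread : Char) (n : Nat) :
    ∀ (m j j' : Nat), m = n - j → innerScan cs bread j n = some j' → j ≤ j' ∧ j' < n := by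
  intro m
  induction m with
  | zero =>
    intro j j' hm h
    rw [innerScan] at h
    have hj : ¬ j < n := by omega
    simp [hj] at h
  | succ m ih =>
    intro j j' hm h
    rw [innerScan] at h
    by_cases hj : j < n
    · simp only [hj, dif_pos] at h
      by_cases hc : (cs.getD j ' ' == bread) = true
      · simp only [hc, if_true, Option.some.injEq] at h
        omega
      · simp only [hc, Bool.false_eq_true, if_false] at h
        have := ih (j + 1) j' (by omega) h
        omega
    · simp [hj] at h

theorem innerScan_ge {cs : List Char} {bread : Char} {j n j' : Nat}
    (h : innerScan cs bread j n = some j') : j ≤ j' :=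
  (innerScan_bounds cs bread n (n - j) j j' rfl h).1

theorem innerScan_lt {cs : List Char} {bread : Char} {j n j' : Nat}
    (h : innerScan cs bread j n = some j') : j' < n :=
  (innerScan_bounds cs bread n (n - j) j j' rfl h).2

-- the common specification: A's breads list, expressed as a jumping recursion
def go (cs : List Char) (p : Nat) : List Char :=
  if _h : p < cs.length then
    match hj : innerScan cs (cs.getD p ' ') (p + 1) cs.length with
    | none => go cs (p + 1)
    | some j => cs.getD p ' ' :: go cs (j + 1)
  else []
termination_by cs.length - p
decreasing_by
  · omega
  · have h1 := innerScan_ge hj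
    omega

theorem go_eq_stop {cs : List Char} {p : Nat} (h : ¬ p < cs.length) : go cs p = [] := by
  rw [go]; simp [h]

theorem go_eq_none {cs : List Char} {p : Nat} (h : p < cs.length)
    (hj : innerScan cs (cs.getD p ' ') (p + 1) cs.length = none) : go cs p = go cs (p + 1) := by
  rw [go]
  simp only [h, dif_pos]
  split <;> simp_all

theorem go_eq_some {cs : List Char} {p j : Nat} (h : p < cs.length)
    (hj : innerScan cs (cs.getD p ' ') (p + 1) cs.length = some j) :
    go cs p = cs.getD p ' ' :: go cs (j + 1) := by
  rw [go]
  simp only [h, dif_pos]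
  split <;> simp_all

-- the marking fold
theorem markFold_length (len : Nat) : ∀ (a : Nat) (ib : List Bool),
    ((List.range' a len).foldl (fun l k => l.set k true) ib).length = ib.length := by
  induction len with
  | zero => intro a ib; simp
  | succ m ih =>
    intro a ib
    rw [List.range'_succ]
    simpa using ih (a + 1) (ib.set a true)

theorem markFold_getD (len : Nat) : ∀ (a : Nat) (ib : List Bool) (k : Nat),
    a + len ≤ ib.length →
    ((List.range' a len).foldl (fun l k => l.set k true) ib).getD k false
      = if a ≤ k ∧ k < a + len then true else ib.getD k false := by
  induction len with
  | zero =>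
    intro a ib k _
    simp
  | succ m ih =>
    intro a ib k hlen
    rw [List.range'_succ]
    simp only [List.foldl_cons]
    rw [ih (a + 1) (ib.set a true) k (by simp only [List.length_set]; omega)]
    by_cases hk : k = a
    · rw [hk, List.getD_eq_getElem?_getD,
        List.getElem?_set_self (by omega : a < ib.length)]
      simp
      try omega
    · rw [List.getD_eq_getElem?_getD, List.getElem?_set_ne (by omega : a ≠ k),
        ← List.getD_eq_getElem?_getD]
      split_ifs with h1 h2 <;> try rfl
      · omega
      · omega

-- A's outer fold from index i, given the marks agree with "marked below b" on positions ≥ i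
theorem foldA_spec (cs : List Char) (m : Nat) : ∀ (i b : Nat) (breads : List Char) (ib : List Bool),
    m = cs.length - i → b ≤ cs.length → ib.length = cs.length →
    (∀ k, i ≤ k → k < cs.length → ib.getD k false = decide (k < b)) →
    ((List.range' i (cs.length - i)).foldl
      (fun (st : List Char × List Bool) i =>
        if !(st.2.getD i false) then
          let bread := cs.getD i ' '
          match innerScan cs bread (i + 1) cs.length with
          | some j =>
            let ib' := (List.range' i (j + 1 - i)).foldl (fun l k => l.set k true) st.2
            (st.1 ++ [bread], ib')
          | none => st
        else st)
      (breads, ib)).1 = breads ++ go cs (max b i) := by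
  induction m with
  | zero =>
    intro i b breads ib hm hb hlen hib
    have hzero : cs.length - i = 0 := by omega
    rw [hzero]
    simp only [List.range'_zero, List.foldl_nil]
    rw [go_eq_stop (by omega)]
    simp
  | succ m ih =>
    intro i b breads ib hm hb hlen hib
    have hi : i < cs.length := by omega
    have hrange : cs.length - i = m + 1 := by omega
    have hm1 : cs.length - (i + 1) = m := by omega
    rw [hrange, List.range'_succ]
    simp only [List.foldl_cons]
    have hmem : ib.getD i false = decide (i < b) := hib i (le_refl i) hi
    rw [hmem]
    by_cases hib_i : i < b
    · -- marked: skip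
      simp only [hib_i, decide_true, Bool.not_true, Bool.false_eq_true, if_false]
      have hrec := ih (i + 1) b breads ib (by omega) hb hlen
        (fun k hk1 hk2 => hib k (by omega) hk2)
      rw [hm1] at hrec
      rw [hrec]
      have : max b (i + 1) = max b i := by omega
      rw [this]
    · -- unmarked
      simp only [show ¬ (i < b) from hib_i, decide_false, Bool.not_false, if_true]
      have hmax : max b i = i := by omega
      cases hj : innerScan cs (cs.getD i ' ') (i + 1) cs.length with
      | none =>
        have hrec := ih (i + 1) b breads ib (by omega) hb hlen
          (fun k hk1 hk2 => hib k (by omega) hk2)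
        rw [hm1] at hrec
        rw [hrec, hmax, go_eq_none hi hj]
        have : max b (i + 1) = i + 1 := by omega
        rw [this]
      | some j =>
        have hji : i + 1 ≤ j := innerScan_ge hj
        have hjn : j < cs.length := innerScan_lt hj
        have hset : ∀ k, i + 1 ≤ k → k < cs.length →
            ((List.range' i (j + 1 - i)).foldl (fun l k => l.set k true) ib).getD k false
              = decide (k < j + 1) := by
          intro k hk1 hk2
          rw [markFold_getD (j + 1 - i) i ib k (by omega)]
          split_ifs with h1
          · simp; omega
          · rw [hib k (by omega) hk2]
            simp only [decide_eq_decide]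
            omega
        have hrec := ih (i + 1) (j + 1) (breads ++ [cs.getD i ' '])
          ((List.range' i (j + 1 - i)).foldl (fun l k => l.set k true) ib)
          (by omega) (by omega) (by rw [markFold_length]; exact hlen) hset
        rw [hm1] at hrec
        rw [hrec, hmax, go_eq_some hi hj]
        have : max (j + 1) (i + 1) = j + 1 := by omega
        rw [this, List.append_assoc]
        rfl

-- B's build fold: the dict always maps c to the first index ≥ k with cs[·] = c,
-- and the appended list records innerScan at each processed index
theorem foldB_spec (cs : List Char) : ∀ (k : Nat) (d : PySem.Dict Char Nat) (l : List (Option Nat)),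
    k ≤ cs.length →
    (∀ c, d.get? c = innerScan cs c k cs.length) →
    ((List.range k).reverse.foldl
      (fun (st : PySem.Dict Char Nat × List (Option Nat)) i =>
        (st.1.insert (cs.getD i ' ') i, st.2 ++ [st.1.get? (cs.getD i ' ')]))
      (d, l)).2
      = l ++ (List.range k).reverse.map
          (fun i => innerScan cs (cs.getD i ' ') (i + 1) cs.length) := by
  intro k
  induction k with
  | zero => intro d l _ _; simp
  | succ k ih =>
    intro d l hk hd
    rw [List.range_succ]
    simp only [List.reverse_append, List.reverse_cons, List.reverse_nil, List.nil_append,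
      List.cons_append, List.foldl_cons, List.map_cons]
    have hdk : ∀ c, ((d.insert (cs.getD k ' ') k).get? c) = innerScan cs c k cs.length := by
      intro c
      rw [PySem.Dict.get?_insert]
      rw [innerScan]
      have hklt : k < cs.length := by omega
      simp only [hklt, dif_pos]
      by_cases hc : c = cs.getD k ' '
      · subst hc; simp
      · have hbeq : (cs.getD k ' ' == c) = false := by
          simp only [beq_eq_false_iff_ne, ne_eq]
          exact fun h => hc h.symm
        rw [if_neg hc, hbeq]
        simp only [Bool.false_eq_true, if_false]
        exact hd c
    have hrec := ih (d.insert (cs.getD k ' ') k) (l ++ [d.get? (cs.getD k ' ')]) (by omega) hdk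
    rw [hrec, hd (cs.getD k ' ')]
    simp

-- B's walk equals go, given nxt agrees with innerScan and enough fuel
theorem altWalk_spec (cs : List Char) (nxt : List (Option Nat))
    (hnxt : ∀ i, i < cs.length → nxt.getD i none = innerScan cs (cs.getD i ' ') (i + 1) cs.length) :
    ∀ (fuel i : Nat) (out : List Char), cs.length - i < fuel →
    altWalk cs nxt fuel i out = out ++ go cs i := by
  intro fuel
  induction fuel with
  | zero => intro i out h; omega
  | succ fuel ih =>
    intro i out hfuel
    rw [altWalk]
    by_cases hi : i < cs.length
    · simp only [hi, if_true]
      rw [hnxt i hi]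
      cases hj : innerScan cs (cs.getD i ' ') (i + 1) cs.length with
      | none =>
        rw [go_eq_none hi hj]
        exact ih (i + 1) out (by omega)
      | some j =>
        have h1 := innerScan_ge hj
        show altWalk cs nxt fuel (j + 1) (out ++ [cs.getD i ' ']) = out ++ go cs i
        rw [go_eq_some hi hj, ih (j + 1) (out ++ [cs.getD i ' ']) (by omega)]
        simp
    · rw [go_eq_stop hi]
      simp [hi]

-- ===== VERDICT (by name: the statement is the Claim_ definition above) =====
theorem find_bread_colors_spec : Claim_equal_find_bread_colors := by
  intro input_str _
  unfold Spec_find_bread_colors find_bread_colors find_bread_colors_alt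
  simp only
  set cs := input_str.toList with hcs
  -- A's side
  have hA : ((List.range cs.length).foldl
      (fun (st : List Char × List Bool) i =>
        if !(st.2.getD i false) then
          let bread := cs.getD i ' '
          match innerScan cs bread (i + 1) cs.length with
          | some j =>
            let ib' := (List.range' i (j + 1 - i)).foldl (fun l k => l.set k true) st.2
            (st.1 ++ [bread], ib')
          | none => st
        else st)
      ([], List.replicate cs.length false)).1 = go cs 0 := by
    have := foldA_spec cs (cs.length - 0) 0 0 [] (List.replicate cs.length false)
      rfl (by omega) (by simp) (by intro k _ hk; simp [List.getD_eq_getElem?_getD, hk])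
    simpa [List.range_eq_range'] using this
  -- B's side: the built table is correct
  have hbuild := foldB_spec cs cs.length PySem.Dict.empty [] (le_refl _)
    (by intro c; rw [innerScan]; simp [PySem.Dict.get?_empty])
  have hnxt : ∀ i, i < cs.length →
      (((List.range cs.length).reverse.foldl
        (fun (st : PySem.Dict Char Nat × List (Option Nat)) i =>
          (st.1.insert (cs.getD i ' ') i, st.2 ++ [st.1.get? (cs.getD i ' ')]))
        (PySem.Dict.empty, [])).2.reverse).getD i none
        = innerScan cs (cs.getD i ' ') (i + 1) cs.length := by
    intro i hi
    rw [hbuild]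
    rw [List.nil_append, List.map_reverse, List.reverse_reverse]
    rw [List.getD_eq_getElem?_getD, List.getElem?_map, List.getElem?_range hi]
    rfl
  have hB := altWalk_spec cs _ hnxt (cs.length + 1) 0 [] (by omega)
  rw [hA, hB]
  rfl
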